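-- pv_equiv track=rewrite | github.com/Wooyong-Choi/seq2seq_pytorch | seq2seq/dataset/Dataset.py | _filterBlank
-- ===== SOURCE A (Python) =====
-- def _filterBlank(pair):
--     blank_idx = [i for i, x in enumerate(pair[0]) if x == "^"]
--
--     # 띄어쓰기 제거
--     for i in range(len(blank_idx)):
--         blank_idx[i] -= i
--         pair[0].pop(blank_idx[i])
--
--     blank_idx.insert(0, 0)
--     blank_idx.append(len(pair[0]))
--
--     return blank_idx
-- ===== SOURCE B (Python) =====
-- def _filterBlank(pair):
--     # Segment decomposition: split pair[0] into runs of tokens between "^" markers,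
--     # write the flattened runs back in place, return prefix sums of run lengths.
--     segs = []
--     cur = []
--     for tok in pair[0]:
--         if tok == "^":
--             segs.append(cur)
--             cur = []
--         else:
--             cur.append(tok)
--     segs.append(cur)
--     pair[0][:] = [t for seg in segs for t in seg]
--     out = [0]
--     for seg in segs:
--         out.append(out[-1] + len(seg))
--     return out
-- ===== Notes on version B (the rewrite author's own statement) =====
-- stated objective: alternative
-- what changed: Instead of locating '^' indices and popping them one by one with a shifting-index correction, B splits the token list into runs between markers, writes the flattened runs back in place via pair[0][:] = ..., and returns the prefix sums of the run lengths.
-- outside the precondition, e.g. on _filterBlank([]): A raises IndexError, B raises IndexError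
import Mathlib
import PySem

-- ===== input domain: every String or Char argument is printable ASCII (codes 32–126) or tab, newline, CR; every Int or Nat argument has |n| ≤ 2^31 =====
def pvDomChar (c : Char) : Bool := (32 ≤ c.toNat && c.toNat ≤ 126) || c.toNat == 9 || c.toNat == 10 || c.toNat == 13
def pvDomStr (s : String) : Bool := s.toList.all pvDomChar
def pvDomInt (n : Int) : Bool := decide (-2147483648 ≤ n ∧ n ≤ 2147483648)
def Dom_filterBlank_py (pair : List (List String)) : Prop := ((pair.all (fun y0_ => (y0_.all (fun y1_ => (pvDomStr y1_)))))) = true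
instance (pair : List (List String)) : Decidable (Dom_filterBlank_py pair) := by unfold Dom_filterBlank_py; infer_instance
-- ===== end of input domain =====

-- B replaces A's index-pop loop by a run-splitting/prefix-sum decomposition (same cost class);
-- both Pythons mutate pair[0] in place to the filtered tokens identically — the theorems here are about the return value.

-- ===== PORT A =====
-- literal transliteration of A: blank_idx via enumerate-filter, then a loop popping pair[0]
-- at the shift-corrected index, then insert(0,0) and append len(pair[0]).
def filterBlank_py (pair : List (List String)) : List Int :=
  match pair with
  | [] => []   -- pair[0] raises IndexError in Python; excluded by Pre_
  | p0 :: _ =>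
    let blank_idx : List Int :=
      ((PySem.List.enumerate p0 0).filter (fun p => p.2 == "^")).map (fun p => p.1)
    let st := (List.range blank_idx.length).foldl
      (fun (st : List Int × List String) i =>
        let v := st.1.getD i 0 - (i : Int)
        ((st.1.set i v), ((PySem.List.pop? st.2 v).map Prod.snd).getD st.2))
      (blank_idx, p0)
    PySem.List.insert st.1 0 0 ++ [(st.2.length : Int)]

-- ===== PORT B =====
-- literal transliteration of B: fold building (finished runs, current run), then a fold
-- appending out[-1] + len(seg) for each run.
def filterBlank_py_alt (pair : List (List String)) : List Int :=
  match pair with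
  | [] => []   -- pair[0] raises IndexError in Python; excluded by Pre_
  | p0 :: _ =>
    let st := p0.foldl
      (fun (st : List (List String) × List String) tok =>
        if tok == "^" then (st.1 ++ [st.2], ([] : List String)) else (st.1, st.2 ++ [tok]))
      (([] : List (List String)), ([] : List String))
    let segs := st.1 ++ [st.2]
    segs.foldl (fun out seg => out ++ [out.getLastD 0 + (seg.length : Int)]) ([0] : List Int)

-- ===== PRECONDITION & SPEC =====
-- Pre_ excludes only pair = [], where Python A raises IndexError on pair[0].
def Pre_filterBlank_py (pair : List (List String)) : Prop := pair ≠ []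
instance (pair : List (List String)) : Decidable (Pre_filterBlank_py pair) := by unfold Pre_filterBlank_py; infer_instance
def pvWitness_filterBlank_py : List (List String) := [["a", "^", "b"]]
def Spec_filterBlank_py (pair : List (List String)) (out : List Int) : Prop := out = filterBlank_py_alt pair
instance (pair : List (List String)) (out : List Int) : Decidable (Spec_filterBlank_py pair out) := by unfold Spec_filterBlank_py; infer_instance

-- ===== CLAIM (what is proved, stated in full; the proofs are below) =====
def Claim_equal_filterBlank_py : Prop := ∀ (pair : List (List String)), Dom_filterBlank_py pair → Pre_filterBlank_py pair → Spec_filterBlank_py pair (filterBlank_py pair)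

-- ===== LEMMAS AND PROOFS =====

-- common reference value: core l = the blank-position list both programs return for token list l
def core : List String → List Int
  | [] => [0, 0]
  | x :: l => if x == "^" then 0 :: core l else 0 :: (core l).tail.map (· + 1)

theorem core_head (l : List String) : core l = 0 :: (core l).tail := by
  cases l with
  | nil => rfl
  | cons x l => simp only [core]; split <;> rfl


-- ---- proof-only helpers ----

-- marker positions of "^" as the port's enumerate/filter/map computes them, from start s
def markersFrom (s : Int) (l : List String) : List Int :=
  ((PySem.List.enumerate l s).filter (fun p => p.2 == "^")).map (fun p => p.1)

-- A's shift-corrected pop indices: j-th value minus its loop counter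
def adjustFrom (i : Nat) : List Int → List Int
  | [] => []
  | v :: r => (v - (i : Int)) :: adjustFrom (i + 1) r

def popStep (q : List String) (v : Int) : List String :=
  ((PySem.List.pop? q v).map Prod.snd).getD q

def popAll (q : List String) (vs : List Int) : List String :=
  vs.foldl popStep q

-- B's run-splitting, as a pure recursion
def splitR (cur : List String) : List String → List (List String)
  | [] => [cur]
  | x :: l => if x == "^" then cur :: splitR ([] : List String) l else splitR (cur ++ [x]) l

def prefixSums (m : Int) : List (List String) → List Int
  | [] => []
  | s :: ss => (m + (s.length : Int)) :: prefixSums (m + (s.length : Int)) ss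

-- ---- lemmas about A's side ----

theorem markersFrom_succ (l : List String) : ∀ s : Int,
    markersFrom (s + 1) l = (markersFrom s l).map (· + 1) := by
  induction l with
  | nil => intro s; simp [markersFrom]
  | cons x l ih =>
    intro s
    by_cases h : x == "^" <;>
      simp [markersFrom, PySem.List.enumerate_cons, h] at * <;>
      simp [ih (s + 1)]

theorem markers_caret (x : String) (l : List String) (h : (x == "^") = true) :
    markersFrom 0 (x :: l) = 0 :: (markersFrom 0 l).map (· + 1) := by
  have h1 : markersFrom (0 + 1) l = (markersFrom 0 l).map (· + 1) := markersFrom_succ l 0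
  simp [markersFrom, PySem.List.enumerate_cons, h] at *
  exact h1

theorem markers_nocaret (x : String) (l : List String) (h : (x == "^") = false) :
    markersFrom 0 (x :: l) = (markersFrom 0 l).map (· + 1) := by
  have h1 : markersFrom (0 + 1) l = (markersFrom 0 l).map (· + 1) := markersFrom_succ l 0
  simp [markersFrom, PySem.List.enumerate_cons, h] at *
  exact h1

theorem adjust_shift (ms : List Int) : ∀ i : Nat,
    adjustFrom (i + 1) (ms.map (· + 1)) = adjustFrom i ms := by
  induction ms with
  | nil => intro i; simp [adjustFrom]
  | cons v ms ih =>
    intro i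
    simp only [List.map_cons, adjustFrom, ih (i + 1)]
    congr 1
    push_cast; ring

theorem adjust_map (ms : List Int) : ∀ i : Nat,
    adjustFrom i (ms.map (· + 1)) = (adjustFrom i ms).map (· + 1) := by
  induction ms with
  | nil => intro i; simp [adjustFrom]
  | cons v ms ih =>
    intro i
    simp only [List.map_cons, adjustFrom, ih (i + 1)]
    congr 1
    ring

theorem adjust_nonneg (l : List String) :
    ∀ v ∈ adjustFrom 0 (markersFrom 0 l), 0 ≤ v := by
  induction l with
  | nil => simp [markersFrom, adjustFrom]
  | cons x l ih =>
    by_cases h : (x == "^") = true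
    · rw [markers_caret x l h]
      intro v hv
      simp only [adjustFrom, Nat.cast_zero, sub_zero, List.mem_cons] at hv
      rcases hv with rfl | hv
      · norm_num
      · rw [show (0 + 1 : Nat) = 0 + 1 from rfl, adjust_shift] at hv
        exact ih v hv
    · rw [markers_nocaret x l (by simpa using h), adjust_map]
      intro v hv
      simp only [List.mem_map] at hv
      obtain ⟨w, hw, rfl⟩ := hv
      have := ih w hw
      omega

theorem pop_cons_shift (x : String) (q : List String) (v : Int) (hv : 0 ≤ v) :
    popStep (x :: q) (v + 1) = x :: popStep q v := by
  obtain ⟨m, rfl⟩ := Int.eq_ofNat_of_zero_le hv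
  by_cases hm : m < q.length
  · have h1 : PySem.List.pop? q (m : Int) = some (q[m], q.eraseIdx m) :=
      PySem.List.pop?_natCast q m hm
    have hlt : m + 1 < (x :: q).length := by simp; omega
    have h2 := PySem.List.pop?_natCast (x :: q) (m + 1) hlt
    have hcast : ((m : Int) + 1) = ((m + 1 : Nat) : Int) := by push_cast; ring
    rw [popStep, popStep, hcast, h1, h2]
    simp [List.eraseIdx_cons_succ]
  · have h1 : PySem.List.pop? q (m : Int) = none := by
      simp [PySem.List.pop?, PySem.List.pyIdx?, hm]
    have h2 : PySem.List.pop? (x :: q) ((m : Int) + 1) = none := by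
      simp [PySem.List.pop?, PySem.List.pyIdx?, hm]
      omega
    simp [popStep, h1, h2]

theorem popAll_cons_shift (vs : List Int) : ∀ (q : List String) (x : String),
    (∀ v ∈ vs, 0 ≤ v) → popAll (x :: q) (vs.map (· + 1)) = x :: popAll q vs := by
  induction vs with
  | nil => intro q x _; rfl
  | cons v vs ih =>
    intro q x hpos
    simp only [List.map_cons, popAll, List.foldl_cons]
    rw [pop_cons_shift x q v (hpos v (by simp))]
    exact ih (popStep q v) x (fun w hw => hpos w (by simp [hw]))

theorem popAll_adj (l : List String) :
    popAll l (adjustFrom 0 (markersFrom 0 l)) = l.filter (fun x => !(x == "^")) := by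
  induction l with
  | nil => simp [markersFrom, adjustFrom, popAll]
  | cons x l ih =>
    by_cases h : (x == "^") = true
    · rw [markers_caret x l h]
      simp only [adjustFrom, Nat.cast_zero, sub_zero]
      rw [show (0 + 1 : Nat) = 0 + 1 from rfl, adjust_shift]
      simp only [popAll, List.foldl_cons]
      have hstep : popStep (x :: l) 0 = l := by
        simp [popStep, PySem.List.pop?_zero_cons]
      rw [hstep]
      simp [h]
      exact ih
    · rw [markers_nocaret x l (by simpa using h), adjust_map,
        popAll_cons_shift _ l x (adjust_nonneg l)]
      simp [h]
      exact ih

-- the imperative index loop of A, characterised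
theorem foldA (rest : List Int) : ∀ (done : List Int) (q : List String),
    (List.range' done.length rest.length).foldl
      (fun (st : List Int × List String) i =>
        let v := st.1.getD i 0 - (i : Int)
        ((st.1.set i v), ((PySem.List.pop? st.2 v).map Prod.snd).getD st.2))
      (done ++ rest, q)
      = (done ++ adjustFrom done.length rest, popAll q (adjustFrom done.length rest)) := by
  induction rest with
  | nil => intro done q; simp [adjustFrom, popAll]
  | cons v rest ih =>
    intro done q
    rw [List.length_cons, List.range'_succ, List.foldl_cons]
    have hget : (done ++ v :: rest).getD done.length 0 = v := by
      simp [List.getD]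
    have hset : (done ++ v :: rest).set done.length (v - (done.length : Int))
        = (done ++ [v - (done.length : Int)]) ++ rest := by
      rw [List.set_append]
      simp
    simp only [hget, hset]
    have hlen : (done ++ [v - (done.length : Int)]).length = done.length + 1 := by simp
    have := ih (done ++ [v - (done.length : Int)])
      (((PySem.List.pop? q (v - (done.length : Int))).map Prod.snd).getD q)
    rw [hlen] at this
    rw [this]
    simp only [adjustFrom, popAll, List.foldl_cons, List.append_assoc, List.cons_append,
      List.nil_append]
    rfl

-- A's return value equals core
theorem A_eq (p0 : List String) (t : List (List String)) :
    filterBlank_py (p0 :: t) = core p0 := by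
  have hfold := foldA (markersFrom 0 p0) [] p0
  simp only [List.length_nil, List.nil_append] at hfold
  have hrange : List.range (markersFrom 0 p0).length
      = List.range' 0 (markersFrom 0 p0).length := List.range_eq_range'
  have hA : filterBlank_py (p0 :: t)
      = 0 :: adjustFrom 0 (markersFrom 0 p0)
          ++ [((popAll p0 (adjustFrom 0 (markersFrom 0 p0))).length : Int)] := by
    simp only [filterBlank_py, markersFrom, hrange] at *
    rw [hfold]
    simp [PySem.List.insert_zero]
  rw [hA, popAll_adj]
  clear hfold hA hrange
  induction p0 with
  | nil => rfl
  | cons x l ih =>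
    by_cases h : (x == "^") = true
    · rw [markers_caret x l h]
      simp only [adjustFrom, Nat.cast_zero, sub_zero, adjust_shift]
      simp only [List.filter_cons, h, Bool.not_true, Bool.false_eq_true, if_false]
      simp only [core, h, if_true]
      rw [← ih]
      simp
    · have hb : (x == "^") = false := by simpa using h
      rw [markers_nocaret x l hb, adjust_map]
      simp only [List.filter_cons, hb, Bool.not_false, if_true]
      simp only [core, hb, Bool.false_eq_true, if_false]
      rw [← ih]
      simp only [List.tail_cons, List.map_append, List.map_cons, List.map_nil,
        List.length_cons, List.cons_append]
      push_cast
      ring_nf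

-- ---- lemmas about B's side ----

theorem foldl_split (l : List String) : ∀ (segs : List (List String)) (cur : List String),
    (l.foldl (fun (st : List (List String) × List String) tok =>
        if tok == "^" then (st.1 ++ [st.2], ([] : List String)) else (st.1, st.2 ++ [tok]))
      (segs, cur)).1
    ++ [(l.foldl (fun (st : List (List String) × List String) tok =>
        if tok == "^" then (st.1 ++ [st.2], ([] : List String)) else (st.1, st.2 ++ [tok]))
      (segs, cur)).2]
    = segs ++ splitR cur l := by
  induction l with
  | nil => intro segs cur; simp [splitR]
  | cons x l ih =>
    intro segs cur
    by_cases h : (x == "^") = true <;>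
      simp only [List.foldl_cons, splitR, h, if_true, if_false, Bool.false_eq_true]
    · rw [ih]; simp
    · rw [ih]

theorem outFold_spec (segs : List (List String)) : ∀ out0 : List Int,
    segs.foldl (fun out seg => out ++ [out.getLastD 0 + (seg.length : Int)]) out0
      = out0 ++ prefixSums (out0.getLastD 0) segs := by
  induction segs with
  | nil => intro out0; simp [prefixSums]
  | cons s segs ih =>
    intro out0
    simp only [List.foldl_cons, prefixSums, ih]
    rw [List.getLastD_concat]
    simp

theorem split_core (l : List String) : ∀ (cur : List String) (m : Int),
    prefixSums m (splitR cur l) = (core l).tail.map (· + (m + (cur.length : Int))) := by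
  induction l with
  | nil => intro cur m; simp [splitR, prefixSums, core]
  | cons x l ih =>
    intro cur m
    by_cases h : (x == "^") = true
    · simp only [splitR, h, if_true, prefixSums, core, List.tail_cons]
      rw [ih [] (m + (cur.length : Int))]
      conv_rhs => rw [core_head l]
      simp
    · simp only [splitR, h, Bool.false_eq_true, if_false, core, List.tail_cons]
      rw [ih (cur ++ [x]) m]
      simp only [List.map_map]
      apply List.map_congr_left
      intro a _
      simp only [Function.comp_apply, List.length_append, List.length_cons,
        List.length_nil]
      push_cast
      ring

theorem B_eq (p0 : List String) (t : List (List String)) :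
    filterBlank_py_alt (p0 :: t) = core p0 := by
  simp only [filterBlank_py_alt]
  rw [foldl_split p0 [] []]
  simp only [List.nil_append]
  rw [outFold_spec]
  have hlast : ([0] : List Int).getLastD 0 = 0 := rfl
  rw [hlast, split_core p0 [] 0]
  conv_rhs => rw [core_head p0]
  simp

-- ===== VERDICT =====
theorem filterBlank_py_spec : Claim_equal_filterBlank_py := by
  intro pair _ hpre
  unfold Spec_filterBlank_py
  match pair with
  | [] => exact absurd rfl hpre
  | p0 :: t => rw [A_eq p0 t, B_eq p0 t]
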